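-- pv_equiv track=rewrite | github.com/chldppwls12/StudyTocoteAllsolve | BOJ/4673_셀프_넘버/chldppwls12.py | check
-- ===== SOURCE A (Python) =====
-- def check(n):
--   sum = n
--   while True:
--     if n == 0:
--       break
--     sum += n%10
--     n = n//10
--
--   return sum
-- ===== SOURCE B (Python) =====
-- def check(n):
--   return n + sum(int(c) for c in str(n))
-- ===== Notes on version B (the rewrite author's own statement) =====
-- stated objective: idiomatic
-- what changed: B computes the digit sum from the decimal string representation (sum(int(c) for c in str(n))) instead of A's while-loop with repeated %10 / //10 arithmetic extraction.
import Mathlib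
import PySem

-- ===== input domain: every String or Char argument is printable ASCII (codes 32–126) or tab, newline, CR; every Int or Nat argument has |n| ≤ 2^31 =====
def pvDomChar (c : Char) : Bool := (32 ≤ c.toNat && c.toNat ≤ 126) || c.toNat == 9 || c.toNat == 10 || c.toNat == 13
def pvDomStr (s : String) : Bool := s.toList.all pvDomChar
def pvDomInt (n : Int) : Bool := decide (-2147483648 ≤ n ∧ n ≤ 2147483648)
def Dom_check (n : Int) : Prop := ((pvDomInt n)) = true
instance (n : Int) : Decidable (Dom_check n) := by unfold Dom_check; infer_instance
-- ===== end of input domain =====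

-- B computes the digit sum from str(n)'s characters instead of A's %10 / //10 extraction loop (objective: idiomatic; same cost).


-- ===== PORT A =====
-- A's `while True` loop: fuel-bounded recursion; n.toNat + 1 steps always suffice
-- for the inputs of Pre_check (n ≥ 0), where Python's loop terminates.
def checkLoop : Nat → Int → Int → Int
  | 0, _, sum => sum
  | fuel + 1, n, sum =>
    if n = 0 then sum
    else checkLoop fuel (PySem.Int.floordiv n 10) (sum + PySem.Int.mod n 10)

def check (n : Int) : Int := checkLoop (n.toNat + 1) n n

-- ===== PORT B =====
-- int(c) on a single decimal-digit character (the only characters str(n) contains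
-- for n ≥ 0) is exactly c.toNat - 48; ported by hand with that arithmetic.
def check_alt (n : Int) : Int :=
  n + ((PySem.Int.toStr n).toList.map (fun c => (c.toNat : Int) - 48)).sum

-- ===== PRECONDITION & SPEC =====
-- Pre_ excludes negative n, on which A's while-loop never reaches 0 and diverges
-- (and B raises ValueError on the '-' character); A returns no value there.
def Pre_check (n : Int) : Prop := 0 ≤ n
instance (n : Int) : Decidable (Pre_check n) := by unfold Pre_check; infer_instance
def pvWitness_check : Int := (12345)
def Spec_check (n : Int) (out : Int) : Prop := out = check_alt n
instance (n : Int) (out : Int) : Decidable (Spec_check n out) := by unfold Spec_check; infer_instance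

-- ===== CLAIM (what is proved, stated in full; the proofs are below) =====
def Claim_equal_check : Prop := ∀ (n : Int), Dom_check n → Pre_check n → Spec_check n (check n)

-- ===== LEMMAS AND PROOFS =====

-- reference digit sum
def dsum (n : Nat) : Int := ((Nat.digits 10 n).map (Int.ofNat)).sum

-- digit characters decode back to their value
theorem digitChar_val (d : Nat) (hd : d < 10) :
    ((Nat.digitChar d).toNat : Int) - 48 = (d : Int) := by
  interval_cases d <;> decide

-- A-side loop characterisation
theorem checkLoop_eq (fuel : Nat) : ∀ (n s : Int), 0 ≤ n → n.toNat < fuel →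
    checkLoop fuel n s = s + dsum n.toNat := by
  induction fuel with
  | zero => intro n s _ h; omega
  | succ f ih =>
    intro n s hn hf
    by_cases h0 : n = 0
    · simp [checkLoop, h0, dsum]
    · have hpos : 0 < n := lt_of_le_of_ne hn (Ne.symm h0)
      have hfd : PySem.Int.floordiv n 10 = ((n.toNat / 10 : Nat) : Int) := by
        simp [PySem.Int.floordiv, Int.fdiv_eq_ediv]
        omega
      have hmd : PySem.Int.mod n 10 = ((n.toNat % 10 : Nat) : Int) := by
        simp [PySem.Int.mod, Int.fmod_eq_emod]
        omega
      have hlt : (((n.toNat / 10 : Nat) : Int)).toNat < f := by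
        simp only [Int.toNat_natCast]
        omega
      have hrec := ih ((n.toNat / 10 : Nat) : Int) (s + ((n.toNat % 10 : Nat) : Int)) (by positivity) hlt
      rw [Int.toNat_natCast] at hrec
      have hdig : dsum n.toNat = ((n.toNat % 10 : Nat) : Int) + dsum (n.toNat / 10) := by
        have hne : n.toNat ≠ 0 := by omega
        unfold dsum
        rw [Nat.digits_def' (by norm_num : 1 < 10) (Nat.pos_of_ne_zero hne)]
        simp
      simp only [checkLoop, if_neg h0, hfd, hmd]
      rw [hrec, hdig]
      ring

-- B-side: character-value sum of Nat.toDigitsCore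
theorem toDigitsCore_sum (fuel : Nat) : ∀ (n : Nat) (ds : List Char), n < fuel →
    ((Nat.toDigitsCore 10 fuel n ds).map (fun c => (c.toNat : Int) - 48)).sum
      = dsum n + ((ds).map (fun c => (c.toNat : Int) - 48)).sum := by
  induction fuel with
  | zero => intro n ds h; omega
  | succ f ih =>
    intro n ds hf
    by_cases h : n / 10 = 0
    · have hdig : dsum n = ((n % 10 : Nat) : Int) := by
        unfold dsum
        by_cases h0 : n = 0
        · simp [h0]
        · rw [Nat.digits_def' (by norm_num : 1 < 10) (Nat.pos_of_ne_zero h0)]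
          simp [h]
      rw [show Nat.toDigitsCore 10 (f + 1) n ds = Nat.digitChar (n % 10) :: ds from by
        simp [Nat.toDigitsCore, h]]
      rw [List.map_cons, List.sum_cons, digitChar_val (n % 10) (Nat.mod_lt _ (by norm_num)), hdig]
    · have hlt : n / 10 < f := by omega
      have hdig : dsum n = ((n % 10 : Nat) : Int) + dsum (n / 10) := by
        have h0 : n ≠ 0 := by omega
        unfold dsum
        rw [Nat.digits_def' (by norm_num : 1 < 10) (Nat.pos_of_ne_zero h0)]
        simp
      rw [show Nat.toDigitsCore 10 (f + 1) n ds
            = Nat.toDigitsCore 10 f (n / 10) (Nat.digitChar (n % 10) :: ds) from by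
        simp [Nat.toDigitsCore, h]]
      rw [ih (n / 10) _ hlt, List.map_cons, List.sum_cons,
        digitChar_val (n % 10) (Nat.mod_lt _ (by norm_num)), hdig]
      ring

-- ===== VERDICT (by name: the statement is the Claim_ definition above) =====
theorem check_spec : Claim_equal_check := by
  intro n _ hn
  unfold Spec_check check check_alt
  rw [checkLoop_eq (n.toNat + 1) n n hn (by omega)]
  rw [PySem.Int.toList_toStr]
  have : PySem.Int.toChars n = Nat.toDigits 10 n.toNat := by
    simp [PySem.Int.toChars, not_lt.mpr hn]
  rw [this]
  unfold Nat.toDigits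
  rw [toDigitsCore_sum (n.toNat + 1) n.toNat [] (by omega)]
  simp
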